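-- pv_equiv track=rewrite | github.com/PattrawutJul/Coding_Interview | Agnos/matches/views.py | transform
-- ===== SOURCE A (Python) =====
-- def transform(pattern): #change complicated pattern to be simple ex. **n**?**t** -> *n*?*t
--     trig = False
--     new_pattern = ''
--     for i in range(len(pattern)):
--         if pattern[i]=='*':
--             if(i == len(pattern)-1):
--                 new_pattern+='*'
--             trig = True
--             continue
--         else :
--             if trig==True:
--                 new_pattern+='*'
--                 new_pattern+=pattern[i]
--                 trig = False
--             else:
--                 new_pattern+=pattern[i]
--     return new_pattern
-- ===== SOURCE B (Python) =====
-- def transform(pattern):  # group into maximal runs, map each run, join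
--     pieces = []
--     i, n = 0, len(pattern)
--     while i < n:
--         j = i
--         while j < n and pattern[j] == pattern[i]:
--             j += 1
--         pieces.append('*' if pattern[i] == '*' else pattern[i:j])
--         i = j
--     return ''.join(pieces)
-- ===== Notes on version B (the rewrite author's own statement) =====
-- stated objective: alternative
-- what changed: Replaces the stateful trig-flag per-character scan with a last-index special case by a group-into-maximal-runs pass that maps each run ('*' run -> single '*', other runs kept whole) and joins the pieces.
import Mathlib
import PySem

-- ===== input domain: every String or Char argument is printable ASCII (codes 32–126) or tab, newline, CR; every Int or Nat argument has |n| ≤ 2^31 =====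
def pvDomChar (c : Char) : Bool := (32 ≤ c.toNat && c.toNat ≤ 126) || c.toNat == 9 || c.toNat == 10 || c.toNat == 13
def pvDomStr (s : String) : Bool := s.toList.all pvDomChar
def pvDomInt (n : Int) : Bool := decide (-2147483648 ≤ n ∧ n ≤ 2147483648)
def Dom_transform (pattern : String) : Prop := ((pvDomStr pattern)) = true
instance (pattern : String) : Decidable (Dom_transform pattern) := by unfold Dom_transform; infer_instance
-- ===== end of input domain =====

-- B replaces A's stateful trig-flag per-character scan (with its last-index special case)
-- by a group-into-maximal-runs pass: each '*'-run becomes one '*', other runs are kept whole.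

-- ===== PORT A =====
-- A iterates i over the indices of pattern; recursing over the char list, pattern[i] is the
-- head and 'i == len(pattern)-1' is 'rest = []'.  State: trig flag and the accumulated string
-- (kept as List Char, turned into a String at the end).
def transformLoopA (cs : List Char) (trig : Bool) (acc : List Char) : List Char :=
  match cs with
  | [] => acc
  | c :: rest =>
    if c = '*' then
      -- append '*' only at the last index, set trig, continue
      transformLoopA rest true (if rest = [] then acc ++ ['*'] else acc)
    else
      if trig then transformLoopA rest false (acc ++ ['*', c])
      else transformLoopA rest false (acc ++ [c])

def transform (pattern : String) : String :=
  String.mk (transformLoopA pattern.toList false [])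

-- ===== PORT B =====
-- outer while: one recursive step per maximal run; inner while 'j += 1 while pattern[j]==pattern[i]'
-- is takeWhile/dropWhile on the tail; the piece for a run is '*' or the run itself.
def transformRunsB (cs : List Char) : List (List Char) :=
  match h : cs with
  | [] => []
  | c :: rest =>
    (c :: rest.takeWhile (· == c)) :: transformRunsB (rest.dropWhile (· == c))
termination_by cs.length
decreasing_by
  simp
  exact List.length_dropWhile_le _ rest

def transform_alt (pattern : String) : String :=
  String.mk (((transformRunsB pattern.toList).map
      (fun r => if r.head? = some '*' then ['*'] else r)).flatten)

-- ===== PRECONDITION & SPEC =====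
def Spec_transform (pattern : String) (out : String) : Prop := out = transform_alt pattern
instance (pattern : String) (out : String) : Decidable (Spec_transform pattern out) := by unfold Spec_transform; infer_instance

-- ===== CLAIM (what is proved, stated in full; the proofs are below) =====
def Claim_equal_transform : Prop := ∀ (pattern : String), Dom_transform pattern → Spec_transform pattern (transform pattern)

-- ===== LEMMAS AND PROOFS =====

-- canonical "collapse star runs" function both ports are reduced to
def pvCollapse (cs : List Char) : List Char :=
  match h : cs with
  | [] => []
  | c :: rest =>
    if c = '*' then '*' :: pvCollapse (rest.dropWhile (· == '*'))
    else c :: pvCollapse rest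
termination_by cs.length
decreasing_by
  · simp
    exact List.length_dropWhile_le _ rest
  · simp

theorem transformRunsB_nil : transformRunsB [] = [] := by
  rw [transformRunsB.eq_def]

theorem transformRunsB_cons (c : Char) (rest : List Char) :
    transformRunsB (c :: rest)
      = (c :: rest.takeWhile (· == c)) :: transformRunsB (rest.dropWhile (· == c)) := by
  rw [transformRunsB.eq_def]

theorem pvCollapse_nil : pvCollapse [] = [] := by
  rw [pvCollapse.eq_def]

theorem pvCollapse_cons (c : Char) (rest : List Char) :
    pvCollapse (c :: rest)
      = if c = '*' then '*' :: pvCollapse (rest.dropWhile (· == '*'))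
        else c :: pvCollapse rest := by
  rw [pvCollapse.eq_def]

theorem transformLoopA_append (cs : List Char) :
    ∀ (trig : Bool) (acc : List Char),
      transformLoopA cs trig acc = acc ++ transformLoopA cs trig [] := by
  induction cs with
  | nil => intro trig acc; simp [transformLoopA]
  | cons c rest ih =>
    intro trig acc
    by_cases hc : c = '*'
    · by_cases hr : rest = []
      · subst hr; cases trig <;> simp [transformLoopA, hc]
      · simp only [transformLoopA, if_pos hc, if_neg hr]
        exact ih true acc
    · cases trig
      · rw [show transformLoopA (c :: rest) false acc
              = transformLoopA rest false (acc ++ [c]) by simp [transformLoopA, hc]]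
        rw [show transformLoopA (c :: rest) false []
              = transformLoopA rest false [c] by simp [transformLoopA, hc]]
        rw [ih false (acc ++ [c]), ih false [c]]
        simp
      · rw [show transformLoopA (c :: rest) true acc
              = transformLoopA rest false (acc ++ ['*', c]) by simp [transformLoopA, hc]]
        rw [show transformLoopA (c :: rest) true []
              = transformLoopA rest false ['*', c] by simp [transformLoopA, hc]]
        rw [ih false (acc ++ ['*', c]), ih false ['*', c]]
        simp

theorem transformLoopA_eq_collapse (n : Nat) : ∀ (cs : List Char), cs.length ≤ n →
    transformLoopA cs false [] = pvCollapse cs ∧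
    transformLoopA cs true [] =
      (if cs = [] then [] else '*' :: pvCollapse (cs.dropWhile (· == '*'))) := by
  induction n with
  | zero =>
    intro cs h
    have : cs = [] := List.eq_nil_of_length_eq_zero (Nat.le_zero.mp h)
    subst this; simp [transformLoopA, pvCollapse_nil]
  | succ n ih =>
    intro cs h
    match cs with
    | [] => simp [transformLoopA, pvCollapse_nil]
    | c :: rest =>
      simp only [List.length_cons, Nat.succ_le_succ_iff] at h
      by_cases hc : c = '*'
      · subst hc
        by_cases hr : rest = []
        · subst hr
          simp [transformLoopA, pvCollapse_cons, pvCollapse_nil]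
        · have hrest := ih rest h
          constructor
          · rw [show transformLoopA ('*' :: rest) false [] = transformLoopA rest true [] by
              simp [transformLoopA, hr]]
            rw [hrest.2]
            simp [pvCollapse_cons, hr]
          · rw [show transformLoopA ('*' :: rest) true [] = transformLoopA rest true [] by
              simp [transformLoopA, hr]]
            rw [hrest.2]
            simp [hr]
      · have hrest := ih rest h
        constructor
        · rw [show transformLoopA (c :: rest) false [] = transformLoopA rest false [c] by
            simp [transformLoopA, hc]]
          rw [transformLoopA_append, hrest.1]
          simp [pvCollapse_cons, hc]
        · rw [show transformLoopA (c :: rest) true [] = transformLoopA rest false ['*', c] by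
            simp [transformLoopA, hc]]
          rw [transformLoopA_append, hrest.1]
          have hd : (c :: rest).dropWhile (· == '*') = c :: rest := by
            simp [List.dropWhile_cons, hc]
          simp [hd, pvCollapse_cons, hc]

theorem pvCollapse_append_of_ne_star (t r : List Char) (h : ∀ x ∈ t, x ≠ '*') :
    pvCollapse (t ++ r) = t ++ pvCollapse r := by
  induction t with
  | nil => simp
  | cons x t ih =>
    have hx : x ≠ '*' := h x (by simp)
    rw [List.cons_append, pvCollapse_cons, if_neg hx,
        ih (fun y hy => h y (by simp [hy]))]
    simp

theorem transformRunsB_flatten (n : Nat) : ∀ (cs : List Char), cs.length ≤ n →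
    ((transformRunsB cs).map (fun r => if r.head? = some '*' then ['*'] else r)).flatten
      = pvCollapse cs := by
  induction n with
  | zero =>
    intro cs h
    have : cs = [] := List.eq_nil_of_length_eq_zero (Nat.le_zero.mp h)
    subst this; simp [transformRunsB_nil, pvCollapse_nil]
  | succ n ih =>
    intro cs h
    match cs with
    | [] => simp [transformRunsB_nil, pvCollapse_nil]
    | c :: rest =>
      simp only [List.length_cons, Nat.succ_le_succ_iff] at h
      have hdl : (rest.dropWhile (· == c)).length ≤ n :=
        le_trans (rest.length_dropWhile_le _) h
      rw [transformRunsB_cons]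
      by_cases hc : c = '*'
      · subst hc
        simp only [List.map_cons, List.flatten_cons, List.head?_cons]
        rw [ih _ hdl, pvCollapse_cons]
        simp
      · have hhead : ¬ ((c :: rest.takeWhile (· == c)).head? = some '*') := by
          simp [List.head?_cons, hc]
        simp only [List.map_cons, List.flatten_cons, if_neg hhead]
        rw [ih _ hdl]
        have hall : ∀ x ∈ c :: rest.takeWhile (· == c), x ≠ '*' := by
          intro x hx
          rcases List.mem_cons.mp hx with h1 | h2
          · subst h1; exact hc
          · have := List.mem_takeWhile_imp h2
            simp at this; subst this; exact hc
        have key := pvCollapse_append_of_ne_star (c :: rest.takeWhile (· == c))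
          (rest.dropWhile (· == c)) hall
        rw [List.cons_append, List.takeWhile_append_dropWhile] at key
        rw [← key]

-- ===== VERDICT (by name: the statement is the Claim_ definition above) =====
theorem transform_spec : Claim_equal_transform := by
  intro pattern _
  unfold Spec_transform transform transform_alt
  rw [(transformLoopA_eq_collapse pattern.toList.length pattern.toList le_rfl).1,
      transformRunsB_flatten pattern.toList.length pattern.toList le_rfl]
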